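-- pv_equiv track=rewrite | github.com/lanhao34/assignment1-basics | cs336_basics/flops_accounting.py | count_flops
-- ===== SOURCE A (Python) =====
-- def count_flops(vocab_size: int, context_length: int, num_layers: int, d_model: int, d_ff: int) -> int:
--     # 1. Embedding
--     flops = vocab_size * d_model
--
--     # 2. Positional Encoding
--     flops += context_length * d_model
--
--     # 3. Transformer Blocks
--     for _ in range(num_layers):
--         # 3.1 Multi-Head Attention
--         flops += 12 * context_length * d_model * d_model
--         # 3.2 Feed-Forward Network
--         flops += 2 * context_length * d_model * d_ff
--         # 3.3 RMSNorm
--         flops += 2 * context_length * d_model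
--
--     # 4. Final RMSNorm
--     flops += 2 * context_length * d_model
--
--     return flops
-- ===== SOURCE B (Python) =====
-- def count_flops(vocab_size: int, context_length: int, num_layers: int, d_model: int, d_ff: int) -> int:
--     per_layer = (12 * context_length * d_model * d_model
--                  + 2 * context_length * d_model * d_ff
--                  + 2 * context_length * d_model)
--     return (vocab_size * d_model
--             + context_length * d_model
--             + num_layers * per_layer
--             + 2 * context_length * d_model)
-- ===== Notes on version B (the rewrite author's own statement) =====
-- stated objective: simpler
-- what changed: Replaces the per-layer accumulation loop with one closed-form arithmetic expression (per-layer cost times num_layers); Pre_ restricts to nonnegative num_layers, the natural domain, since a negative layer count is meaningless and A's empty-range value there is as defensible as B's linear formula.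
-- outside the precondition, e.g. on count_flops(10, 4, -1, 8, 16): A returns 176, B returns -3984
import Mathlib
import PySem

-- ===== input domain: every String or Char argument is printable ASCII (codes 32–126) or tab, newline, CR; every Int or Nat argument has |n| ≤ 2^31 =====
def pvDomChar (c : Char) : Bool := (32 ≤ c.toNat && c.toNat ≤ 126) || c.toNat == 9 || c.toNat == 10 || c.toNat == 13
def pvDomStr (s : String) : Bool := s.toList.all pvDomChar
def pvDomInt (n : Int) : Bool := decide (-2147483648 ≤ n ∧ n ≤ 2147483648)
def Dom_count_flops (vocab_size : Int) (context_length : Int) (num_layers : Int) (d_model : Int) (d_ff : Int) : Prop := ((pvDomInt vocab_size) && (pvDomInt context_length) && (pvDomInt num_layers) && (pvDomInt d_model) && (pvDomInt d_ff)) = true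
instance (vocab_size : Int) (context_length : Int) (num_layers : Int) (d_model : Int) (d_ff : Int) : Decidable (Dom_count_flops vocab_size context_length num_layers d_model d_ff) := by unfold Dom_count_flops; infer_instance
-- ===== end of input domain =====

-- ===== PORT A =====
-- B replaces A's per-layer accumulation loop with one closed-form arithmetic expression (simpler).
def count_flops (vocab_size : Int) (context_length : Int) (num_layers : Int) (d_model : Int) (d_ff : Int) : Int :=
  let flops := vocab_size * d_model
  let flops := flops + context_length * d_model
  let flops := (PySem.List.pyRange 0 num_layers 1).foldl
    (fun flops _ =>
      let flops := flops + 12 * context_length * d_model * d_model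
      let flops := flops + 2 * context_length * d_model * d_ff
      flops + 2 * context_length * d_model) flops
  flops + 2 * context_length * d_model

-- ===== PORT B =====
def count_flops_alt (vocab_size : Int) (context_length : Int) (num_layers : Int) (d_model : Int) (d_ff : Int) : Int :=
  let per_layer := 12 * context_length * d_model * d_model
    + 2 * context_length * d_model * d_ff
    + 2 * context_length * d_model
  vocab_size * d_model + context_length * d_model
    + num_layers * per_layer + 2 * context_length * d_model

-- ===== PRECONDITION & SPEC =====
-- Pre_ restricts to nonnegative num_layers, the function's natural domain: on a negative
-- layer count A's empty-range value (zero layers) and B's linear formula are both arbitrary.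
def Pre_count_flops (vocab_size : Int) (context_length : Int) (num_layers : Int) (d_model : Int) (d_ff : Int) : Prop := 0 ≤ num_layers
instance (vocab_size : Int) (context_length : Int) (num_layers : Int) (d_model : Int) (d_ff : Int) : Decidable (Pre_count_flops vocab_size context_length num_layers d_model d_ff) := by unfold Pre_count_flops; infer_instance
def pvWitness_count_flops : Int × Int × Int × Int × Int := (10, 4, 2, 8, 16)

def Spec_count_flops (vocab_size : Int) (context_length : Int) (num_layers : Int) (d_model : Int) (d_ff : Int) (out : Int) : Prop := out = count_flops_alt vocab_size context_length num_layers d_model d_ff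
instance (vocab_size : Int) (context_length : Int) (num_layers : Int) (d_model : Int) (d_ff : Int) (out : Int) : Decidable (Spec_count_flops vocab_size context_length num_layers d_model d_ff out) := by unfold Spec_count_flops; infer_instance

-- ===== CLAIM (what is proved, stated in full; the proofs are below) =====
def Claim_equal_count_flops : Prop := ∀ (vocab_size : Int) (context_length : Int) (num_layers : Int) (d_model : Int) (d_ff : Int), Dom_count_flops vocab_size context_length num_layers d_model d_ff → Pre_count_flops vocab_size context_length num_layers d_model d_ff → Spec_count_flops vocab_size context_length num_layers d_model d_ff (count_flops vocab_size context_length num_layers d_model d_ff)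

-- ===== LEMMAS AND PROOFS =====
theorem foldl_const_add (c : Int) (l : List Int) (init : Int) :
    l.foldl (fun acc _ => acc + c) init = init + l.length * c := by
  induction l generalizing init with
  | nil => simp
  | cons x xs ih => simp [List.foldl, ih]; ring

-- ===== VERDICT (by name: the statement is the Claim_ definition above) =====
theorem count_flops_spec : Claim_equal_count_flops := by
  intro v c n dm df _ hn
  unfold Pre_count_flops at hn
  unfold Spec_count_flops count_flops count_flops_alt
  have h : ((PySem.List.pyRange 0 n 1).foldl
      (fun flops _ =>
        let flops := flops + 12 * c * dm * dm
        let flops := flops + 2 * c * dm * df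
        flops + 2 * c * dm) (v * dm + c * dm))
      = v * dm + c * dm + ((PySem.List.pyRange 0 n 1).length : Int) *
        (12 * c * dm * dm + 2 * c * dm * df + 2 * c * dm) := by
    have := foldl_const_add (12 * c * dm * dm + 2 * c * dm * df + 2 * c * dm)
      (PySem.List.pyRange 0 n 1) (v * dm + c * dm)
    simpa [add_assoc] using this
  simp only [h, PySem.List.length_pyRange_one]
  have hl : ((n - 0).toNat : Int) = n := by omega
  rw [hl]
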